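-- pv_equiv track=rewrite | github.com/sheromon/aoc2020 | day16/day16.py | remove_invalid_tickets
-- ===== SOURCE A (Python) =====
-- def is_potentially_valid(val, rules):
--     for rule in rules.values():
--         for bounds in rule:
--             if bounds[0] <= val <= bounds[1]:
--                 return True
--     return False
--
-- def remove_invalid_tickets(rules, nearby_tickets):
--     valid_tickets = []
--     for ticket_vals in nearby_tickets:
--         valid = True
--         for val in ticket_vals:
--             if not is_potentially_valid(val, rules):
--                 valid = False
--                 break
--         if valid:
--             valid_tickets.append(ticket_vals)
--     return valid_tickets
-- ===== SOURCE B (Python) =====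
-- def remove_invalid_tickets(rules, nearby_tickets):
--     # Preprocess once: collect non-empty intervals, sort by lower bound, merge
--     # overlapping/adjacent ones, then binary-search each ticket value.
--     intervals = [iv for rule in rules.values() for iv in rule if iv[0] <= iv[1]]
--     intervals.sort(key=lambda iv: iv[0])
--     merged = []
--     for lo, hi in intervals:
--         if merged and lo <= merged[-1][1] + 1:
--             if merged[-1][1] < hi:
--                 merged[-1] = (merged[-1][0], hi)
--         else:
--             merged.append((lo, hi))
--
--     def covered(val):
--         lo, hi = 0, len(merged)
--         while lo < hi:
--             mid = (lo + hi) // 2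
--             if merged[mid][0] <= val:
--                 lo = mid + 1
--             else:
--                 hi = mid
--         return lo > 0 and val <= merged[lo - 1][1]
--
--     return [t for t in nearby_tickets if all(covered(v) for v in t)]
-- ===== Notes on version B (the rewrite author's own statement) =====
-- stated objective: faster
-- what changed: Instead of testing every value against every rule interval, B flattens the rule intervals once, sorts and merges them into disjoint ranges, and checks each ticket value with a binary search over the merged ranges.
import Mathlib
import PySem

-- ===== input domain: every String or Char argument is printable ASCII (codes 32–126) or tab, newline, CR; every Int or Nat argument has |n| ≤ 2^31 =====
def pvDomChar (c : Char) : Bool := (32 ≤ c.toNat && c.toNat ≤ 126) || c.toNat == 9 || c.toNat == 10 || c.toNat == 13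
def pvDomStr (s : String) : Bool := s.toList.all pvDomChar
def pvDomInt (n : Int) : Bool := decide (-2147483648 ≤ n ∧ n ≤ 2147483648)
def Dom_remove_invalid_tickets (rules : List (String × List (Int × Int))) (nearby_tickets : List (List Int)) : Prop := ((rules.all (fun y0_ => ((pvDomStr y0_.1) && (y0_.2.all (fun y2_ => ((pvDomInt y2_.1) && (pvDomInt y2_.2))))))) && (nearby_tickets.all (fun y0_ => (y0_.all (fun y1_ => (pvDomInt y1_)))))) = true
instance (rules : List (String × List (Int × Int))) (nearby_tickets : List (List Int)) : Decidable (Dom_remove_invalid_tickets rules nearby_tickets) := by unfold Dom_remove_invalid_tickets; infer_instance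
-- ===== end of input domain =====

-- B merges the rule intervals once and binary-searches each ticket value, replacing
-- A's scan of every rule interval per value (objective: faster).

-- ===== PORT A =====
def is_potentially_valid (val : Int) (rules : PySem.Dict String (List (Int × Int))) : Bool :=
  rules.values.any (fun rule => rule.any (fun bounds => decide (bounds.1 ≤ val) && decide (val ≤ bounds.2)))

def remove_invalid_tickets (rules : List (String × List (Int × Int))) (nearby_tickets : List (List Int)) : List (List Int) :=
  let d := PySem.Dict.ofList rules
  nearby_tickets.foldl (fun valid_tickets ticket_vals =>
    if ticket_vals.all (fun val => is_potentially_valid val d) then valid_tickets ++ [ticket_vals]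
    else valid_tickets) []

-- ===== PORT B =====
-- merge loop of Source B; the accumulator keeps Python's `merged` reversed (head = merged[-1]),
-- the final .reverse in remove_invalid_tickets_alt restores append order
def pvMergeStep (merged : List (Int × Int)) (iv : Int × Int) : List (Int × Int) :=
  match merged with
  | [] => [iv]
  | last :: rest =>
    if iv.1 ≤ last.2 + 1 then
      (if last.2 < iv.2 then (last.1, iv.2) :: rest else last :: rest)
    else iv :: last :: rest

-- the `while lo < hi` binary-search loop of Source B's covered(); lo, hi, mid are
-- nonnegative, so Nat with `/ 2` is exact for Python's `// 2`, and `mid` is always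
-- in range (lo ≤ mid < hi ≤ len), so getD's default is never read
def pvBisect (merged : List (Int × Int)) (val : Int) (lo hi : Nat) : Nat :=
  if h : lo < hi then
    if (merged.getD ((lo + hi) / 2) (0, 0)).1 ≤ val then pvBisect merged val ((lo + hi) / 2 + 1) hi
    else pvBisect merged val lo ((lo + hi) / 2)
  else lo
termination_by hi - lo
decreasing_by all_goals omega

def pvCovered (merged : List (Int × Int)) (val : Int) : Bool :=
  let j := pvBisect merged val 0 merged.length
  decide (0 < j) && decide (val ≤ (merged.getD (j - 1) (0, 0)).2)

def remove_invalid_tickets_alt (rules : List (String × List (Int × Int))) (nearby_tickets : List (List Int)) : List (List Int) :=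
  let intervals := (PySem.Dict.ofList rules).values.flatMap (fun rule => rule.filter (fun iv => decide (iv.1 ≤ iv.2)))
  let s := PySem.List.sorted intervals (fun iv => iv.1) false
  let merged := (s.foldl pvMergeStep []).reverse
  nearby_tickets.filter (fun t => t.all (fun v => pvCovered merged v))

-- ===== PRECONDITION & SPEC =====
def Spec_remove_invalid_tickets (rules : List (String × List (Int × Int))) (nearby_tickets : List (List Int)) (out : List (List Int)) : Prop := out = remove_invalid_tickets_alt rules nearby_tickets
instance (rules : List (String × List (Int × Int))) (nearby_tickets : List (List Int)) (out : List (List Int)) : Decidable (Spec_remove_invalid_tickets rules nearby_tickets out) := by unfold Spec_remove_invalid_tickets; infer_instance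

-- ===== CLAIM (what is proved, stated in full; the proofs are below) =====
def Claim_equal_remove_invalid_tickets : Prop := ∀ (rules : List (String × List (Int × Int))) (nearby_tickets : List (List Int)), Dom_remove_invalid_tickets rules nearby_tickets → Spec_remove_invalid_tickets rules nearby_tickets (remove_invalid_tickets rules nearby_tickets)

-- ===== LEMMAS AND PROOFS =====

-- v lies in some interval of the list
def pvCovers (ivs : List (Int × Int)) (v : Int) : Prop := ∃ iv ∈ ivs, iv.1 ≤ v ∧ v ≤ iv.2

lemma pvCovers_nil (v : Int) : ¬ pvCovers [] v := by simp [pvCovers]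

lemma pvCovers_cons (iv : Int × Int) (ivs : List (Int × Int)) (v : Int) :
    pvCovers (iv :: ivs) v ↔ (iv.1 ≤ v ∧ v ≤ iv.2) ∨ pvCovers ivs v := by
  simp [pvCovers]

-- merge preserves coverage (needs: s sorted by lower bound, acc's head below all of s)
lemma pvMerge_covers (v : Int) :
    ∀ (s acc : List (Int × Int)),
      s.Pairwise (fun a b => a.1 ≤ b.1) →
      (∀ last rest, acc = last :: rest → ∀ a ∈ s, last.1 ≤ a.1) →
      (pvCovers (s.foldl pvMergeStep acc) v ↔ pvCovers acc v ∨ pvCovers s v) := by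
  intro s
  induction s with
  | nil => intro acc _ _; simp [pvCovers]
  | cons iv tl ih =>
    intro acc hpair hacc
    have hpt := (List.pairwise_cons.mp hpair).1
    have htl := (List.pairwise_cons.mp hpair).2
    match acc with
    | [] =>
      simp only [List.foldl_cons, pvMergeStep]
      rw [ih [iv] htl (by rintro last rest ⟨rfl, rfl⟩; exact hpt)]
      simp only [pvCovers_cons, pvCovers_nil]
      tauto
    | last :: rest =>
      have hlast : ∀ a ∈ iv :: tl, last.1 ≤ a.1 := hacc last rest rfl
      have hli : last.1 ≤ iv.1 := hlast iv (by simp)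
      simp only [List.foldl_cons, pvMergeStep]
      by_cases h1 : iv.1 ≤ last.2 + 1
      · by_cases h2 : last.2 < iv.2
        · rw [if_pos h1, if_pos h2]
          rw [ih ((last.1, iv.2) :: rest) htl
            (by rintro l r ⟨rfl, rfl⟩; intro a ha; exact hlast a (by simp [ha]))]
          simp only [pvCovers_cons]
          have hkey : (last.1 ≤ v ∧ v ≤ iv.2) ↔
              ((last.1 ≤ v ∧ v ≤ last.2) ∨ (iv.1 ≤ v ∧ v ≤ iv.2)) := by omega
          rw [hkey]; tauto
        · rw [if_pos h1, if_neg h2]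
          rw [ih (last :: rest) htl
            (by rintro l r ⟨rfl, rfl⟩; intro a ha; exact hlast a (by simp [ha]))]
          simp only [pvCovers_cons]
          have hkey : (iv.1 ≤ v ∧ v ≤ iv.2) → (last.1 ≤ v ∧ v ≤ last.2) := by omega
          tauto
      · rw [if_neg h1]
        rw [ih (iv :: last :: rest) htl
          (by rintro l r ⟨rfl, rfl⟩; exact hpt)]
        simp only [pvCovers_cons]
        tauto

-- merge output structure: strictly separated (gap ≥ 2) reversed chain of non-empty intervals
lemma pvMerge_structure :
    ∀ (s acc : List (Int × Int)),
      s.Pairwise (fun a b => a.1 ≤ b.1) →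
      (∀ a ∈ s, a.1 ≤ a.2) →
      (∀ last rest, acc = last :: rest → ∀ a ∈ s, last.1 ≤ a.1) →
      acc.Pairwise (fun a b => b.2 + 1 < a.1) →
      (∀ a ∈ acc, a.1 ≤ a.2) →
      ((s.foldl pvMergeStep acc).Pairwise (fun a b => b.2 + 1 < a.1) ∧
        ∀ a ∈ s.foldl pvMergeStep acc, a.1 ≤ a.2) := by
  intro s
  induction s with
  | nil => intro acc _ _ _ hp hn; exact ⟨hp, hn⟩
  | cons iv tl ih =>
    intro acc hpair hne hacc hp hn
    have hpt := (List.pairwise_cons.mp hpair).1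
    have htl := (List.pairwise_cons.mp hpair).2
    have hivne : iv.1 ≤ iv.2 := hne iv (by simp)
    have hnetl : ∀ a ∈ tl, a.1 ≤ a.2 := fun a ha => hne a (by simp [ha])
    match acc with
    | [] =>
      simp only [List.foldl_cons, pvMergeStep]
      exact ih [iv] htl hnetl (by rintro l r ⟨rfl, rfl⟩; exact hpt)
        (by simp) (by simpa using hivne)
    | last :: rest =>
      have hlast : ∀ a ∈ iv :: tl, last.1 ≤ a.1 := hacc last rest rfl
      have hli : last.1 ≤ iv.1 := hlast iv (by simp)
      have hlastne : last.1 ≤ last.2 := hn last (by simp)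
      have hrest := (List.pairwise_cons.mp hp).2
      have hrlt : ∀ a ∈ rest, a.2 + 1 < last.1 := (List.pairwise_cons.mp hp).1
      simp only [List.foldl_cons, pvMergeStep]
      by_cases h1 : iv.1 ≤ last.2 + 1
      · by_cases h2 : last.2 < iv.2
        · rw [if_pos h1, if_pos h2]
          refine ih ((last.1, iv.2) :: rest) htl hnetl
            (by rintro l r ⟨rfl, rfl⟩; intro a ha; exact hlast a (by simp [ha]))
            (List.pairwise_cons.mpr ⟨fun a ha => hrlt a ha, hrest⟩)
            ?_
          intro a ha
          rcases List.mem_cons.mp ha with rfl | ha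
          · simp; omega
          · exact hn a (by simp [ha])
        · rw [if_pos h1, if_neg h2]
          exact ih (last :: rest) htl hnetl
            (by rintro l r ⟨rfl, rfl⟩; intro a ha; exact hlast a (by simp [ha])) hp hn
      · rw [if_neg h1]
        refine ih (iv :: last :: rest) htl hnetl
          (by rintro l r ⟨rfl, rfl⟩; exact hpt) ?_ ?_
        · refine List.pairwise_cons.mpr ⟨?_, hp⟩
          intro a ha
          rcases List.mem_cons.mp ha with rfl | ha
          · omega
          · have := hrlt a ha; omega
        · intro a ha
          rcases List.mem_cons.mp ha with rfl | ha
          · exact hivne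
          · exact hn a ha

-- binary-search loop postcondition
lemma pvBisect_spec (merged : List (Int × Int)) (v : Int) :
    ∀ fuel lo hi : Nat, hi - lo ≤ fuel → lo ≤ hi → hi ≤ merged.length →
      (∀ i j : Nat, (hij : i ≤ j) → (hj : j < merged.length) →
        (merged[i]'(by omega)).1 ≤ (merged[j]'hj).1) →
      (∀ i : Nat, (hi' : i < merged.length) → i < lo → (merged[i]'hi').1 ≤ v) →
      (∀ i : Nat, (hi' : i < merged.length) → hi ≤ i → v < (merged[i]'hi').1) →
      (lo ≤ pvBisect merged v lo hi ∧ pvBisect merged v lo hi ≤ hi ∧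
        (∀ i : Nat, (hi' : i < merged.length) → i < pvBisect merged v lo hi → (merged[i]'hi').1 ≤ v) ∧
        (∀ i : Nat, (hi' : i < merged.length) → pvBisect merged v lo hi ≤ i → v < (merged[i]'hi').1)) := by
  intro fuel
  induction fuel with
  | zero =>
    intro lo hi hf hlh _ _ hlo hhi2
    have : lo = hi := by omega
    subst this
    rw [pvBisect, dif_neg (by omega)]
    exact ⟨le_refl _, le_refl _, hlo, hhi2⟩
  | succ f ihf =>
    intro lo hi hf hlh hlen hmono hlo hhi2
    by_cases h : lo < hi
    · rw [pvBisect, dif_pos h]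
      have hmidlt : (lo + hi) / 2 < merged.length := by omega
      have hget : merged.getD ((lo + hi) / 2) (0, 0) = merged[(lo + hi) / 2]'hmidlt := by
        simp [List.getD, List.getElem?_eq_getElem hmidlt]
      by_cases hc : (merged.getD ((lo + hi) / 2) (0, 0)).1 ≤ v
      · rw [if_pos hc]
        refine (ihf ((lo + hi) / 2 + 1) hi (by omega) (by omega) hlen hmono ?_ hhi2).imp
          (by omega) (fun x => x)
        intro i hi' hilt
        exact le_trans (hmono i ((lo + hi) / 2) (by omega) hmidlt) (by rw [← hget]; exact hc)
      · rw [if_neg hc]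
        refine (ihf lo ((lo + hi) / 2) (by omega) (by omega) (by omega) hmono hlo ?_).imp
          (fun x => x) (fun x => ⟨by omega, x.2⟩)
        intro i hi' hge
        have : v < (merged[(lo + hi) / 2]'hmidlt).1 := by rw [← hget]; omega
        exact lt_of_lt_of_le this (hmono ((lo + hi) / 2) i hge hi')
    · rw [pvBisect, dif_neg h]
      have : lo = hi := by omega
      subst this
      exact ⟨le_refl _, le_refl _, hlo, hhi2⟩

lemma pvCovered_iff (merged : List (Int × Int)) (v : Int)
    (hpair : merged.Pairwise (fun a b => a.2 + 1 < b.1))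
    (hne : ∀ a ∈ merged, a.1 ≤ a.2) :
    pvCovered merged v = true ↔ pvCovers merged v := by
  have hmono : ∀ i j : Nat, (hij : i ≤ j) → (hj : j < merged.length) →
      (merged[i]'(by omega)).1 ≤ (merged[j]'hj).1 := by
    intro i j hij hj
    rcases Nat.lt_or_ge i j with hlt | hge
    · have hg := (List.pairwise_iff_getElem.mp hpair) i j (by omega) hj hlt
      have hn := hne (merged[i]'(by omega)) (List.getElem_mem _)
      omega
    · have : i = j := by omega
      subst this; rfl
  obtain ⟨h0, hhi, hlt, hge⟩ :=
    pvBisect_spec merged v merged.length 0 merged.length (by omega) (by omega) (le_refl _)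
      hmono (by omega) (by intro i hi' h; omega)
  set j := pvBisect merged v 0 merged.length with hj
  constructor
  · intro h
    simp only [pvCovered, ← hj, Bool.and_eq_true, decide_eq_true_eq] at h
    obtain ⟨hjpos, hle⟩ := h
    have hjm : j - 1 < merged.length := by omega
    have hgd : merged.getD (j - 1) (0, 0) = merged[j - 1]'hjm := by
      simp [List.getD, List.getElem?_eq_getElem hjm]
    exact ⟨merged[j - 1]'hjm, List.getElem_mem _, hlt (j - 1) hjm (by omega), by rw [← hgd]; exact hle⟩
  · rintro ⟨iv, hmem, hl, hr⟩
    obtain ⟨k, hk, rfl⟩ := List.mem_iff_getElem.mp hmem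
    have hkj : k < j := by
      by_contra hcon
      have := hge k hk (by omega)
      omega
    have hk1 : k = j - 1 := by
      by_contra hcon
      have hklt : k < j - 1 := by omega
      have hjm : j - 1 < merged.length := by omega
      have hgap := (List.pairwise_iff_getElem.mp hpair) k (j - 1) hk hjm (by omega)
      have := hlt (j - 1) hjm (by omega)
      omega
    have hjm : j - 1 < merged.length := by omega
    have hgd : merged.getD (j - 1) (0, 0) = merged[j - 1]'hjm := by
      simp [List.getD, List.getElem?_eq_getElem hjm]
    simp only [pvCovered, ← hj, Bool.and_eq_true, decide_eq_true_eq]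
    exact ⟨by omega, by rw [hgd]; subst hk1; exact hr⟩

-- per-value agreement between A's scan and B's merged binary search
lemma pvValue_agree (rules : List (String × List (Int × Int))) (v : Int) :
    is_potentially_valid v (PySem.Dict.ofList rules) =
      pvCovered (((PySem.List.sorted
          ((PySem.Dict.ofList rules).values.flatMap (fun rule => rule.filter (fun iv => decide (iv.1 ≤ iv.2))))
          (fun iv => iv.1) false).foldl pvMergeStep []).reverse) v := by
  set ivs := (PySem.Dict.ofList rules).values.flatMap (fun rule => rule.filter (fun iv => decide (iv.1 ≤ iv.2))) with hivs
  set s := PySem.List.sorted ivs (fun iv => iv.1) false with hs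
  have hpair : s.Pairwise (fun a b => a.1 ≤ b.1) := PySem.List.sorted_pairwise ivs _
  have hne : ∀ a ∈ s, a.1 ≤ a.2 := by
    intro a ha
    have : a ∈ ivs := (PySem.List.mem_sorted _ _ _ _).mp ha
    rw [hivs] at this
    obtain ⟨rule, _, hmem⟩ := List.mem_flatMap.mp this
    simpa using (List.mem_filter.mp hmem).2
  obtain ⟨hstruct, hnem⟩ := pvMerge_structure s [] hpair hne (by simp) (by simp) (by simp)
  have hcov := pvMerge_covers (v := v) s [] hpair (by simp)
  simp only [pvCovers_nil, false_or] at hcov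
  -- coverage is invariant under reverse
  have hcovrev : pvCovers ((s.foldl pvMergeStep []).reverse) v ↔ pvCovers s v := by
    rw [← hcov]; simp [pvCovers]
  have hcovs : pvCovers s v ↔ pvCovers ivs v := by
    constructor <;> (rintro ⟨iv, hmem, h⟩; exact ⟨iv, by
      first
        | exact (PySem.List.mem_sorted _ _ _ _).mp hmem
        | exact (PySem.List.mem_sorted _ _ _ _).mpr hmem, h⟩)
  have hA : is_potentially_valid v (PySem.Dict.ofList rules) = true ↔ pvCovers ivs v := by
    simp only [is_potentially_valid, List.any_eq_true, Bool.and_eq_true, decide_eq_true_eq,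
      hivs, pvCovers, List.mem_flatMap, List.mem_filter]
    constructor
    · rintro ⟨rule, hrule, bounds, hb, h1, h2⟩
      exact ⟨bounds, ⟨rule, hrule, hb, by simpa using le_trans h1 h2⟩, h1, h2⟩
    · rintro ⟨iv, ⟨rule, hrule, hb, _⟩, h1, h2⟩
      exact ⟨rule, hrule, iv, hb, h1, h2⟩
  have hB := pvCovered_iff ((s.foldl pvMergeStep []).reverse) v
    (by rw [List.pairwise_reverse]; exact hstruct)
    (by intro a ha; exact hnem a (List.mem_reverse.mp ha))
  rw [hcovrev, hcovs] at hB
  rw [Bool.eq_iff_iff, hA, hB]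

-- ===== VERDICT (by name: the statement is the Claim_ definition above) =====
theorem remove_invalid_tickets_spec : Claim_equal_remove_invalid_tickets := by
  intro rules nearby_tickets _
  unfold Spec_remove_invalid_tickets remove_invalid_tickets remove_invalid_tickets_alt
  rw [PySem.List.foldl_append_if_eq_filter, List.nil_append]
  apply List.filter_congr
  intro t _
  rw [Bool.eq_iff_iff, List.all_eq_true, List.all_eq_true]
  constructor <;> intro h v hv
  · rw [← pvValue_agree rules v]; exact h v hv
  · rw [pvValue_agree rules v]; exact h v hv
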